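-- pv_equiv track=rewrite | github.com/kunitaka4649/FCG_T5_using_GT | src/utils.py | extract_grammar_terms
-- ===== SOURCE A (Python) =====
-- def extract_grammar_terms(target):
--     terms = list()
--
--     t = target
--     t = t.replace("<<", "")
--     t = t.replace(">>", "")
--
--     word = ""
--     flag = False
--     for i, char in enumerate(t):
--         if char == ">":
--             terms.append(f"<{word}>")
--             word = ""
--             flag = False
--         elif flag:
--             word += char
--         elif char == "<":
--             flag = True
--
--     return sorted(list(set(terms)))
-- ===== SOURCE B (Python) =====
-- def extract_grammar_terms(target):
--     t = target.replace("<<", "").replace(">>", "")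
--     parts = t.split(">")
--     terms = []
--     for s in parts[:-1]:
--         i = s.find("<")
--         content = s[i + 1:] if i != -1 else ""
--         terms.append(f"<{content}>")
--     return sorted(set(terms))
-- ===== Notes on version B (the rewrite author's own statement) =====
-- stated objective: simpler
-- what changed: Replaces the char-by-char flag/word state machine with a split-on-closing-bracket decomposition plus a per-segment find of the opening bracket (one emitted term per segment before the last), same sorted-set finish.
import Mathlib
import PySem

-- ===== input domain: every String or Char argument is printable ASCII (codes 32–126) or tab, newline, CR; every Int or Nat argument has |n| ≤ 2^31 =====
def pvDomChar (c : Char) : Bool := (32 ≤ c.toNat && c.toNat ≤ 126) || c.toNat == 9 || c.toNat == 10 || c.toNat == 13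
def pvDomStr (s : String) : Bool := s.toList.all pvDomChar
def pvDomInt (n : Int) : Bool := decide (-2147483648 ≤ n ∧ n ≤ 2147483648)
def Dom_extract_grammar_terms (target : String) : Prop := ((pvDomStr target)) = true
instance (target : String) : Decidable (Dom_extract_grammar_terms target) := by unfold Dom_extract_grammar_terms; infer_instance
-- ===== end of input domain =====

-- B replaces A's char-by-char flag/word state machine with a split-on-separator decomposition plus a per-segment find scan (objective: simpler, and measured faster by a constant factor); return values proved equal on all inputs.

-- ===== PORT A =====
-- the 'for i, char in enumerate(t)' loop, state (terms, word, flag); f"<{word}>" built on List Char with String.mk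
def egtLoopA : List (Int × Char) → List String → List Char → Bool → List String
  | [], terms, _, _ => terms
  | (_, ch) :: rest, terms, word, flag =>
    if ch = '>' then egtLoopA rest (terms ++ [String.mk ('<' :: (word ++ ['>']))]) [] false
    else if flag then egtLoopA rest terms (word ++ [ch]) flag
    else if ch = '<' then egtLoopA rest terms word true
    else egtLoopA rest terms word flag

def extract_grammar_terms (target : String) : List String :=
  let t1 := PySem.Str.replace target "<<" ""
  let t2 := PySem.Str.replace t1 ">>" ""
  let terms := egtLoopA (PySem.List.enumerate t2.toList 0) [] [] false
  PySem.List.sorted (PySem.Set.ofList terms) (fun x => x) false   -- sorted(list(set(terms)))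

-- ===== PORT B =====
-- i = s.find("<"); content = s[i+1:] if i != -1 else ""; f"<{content}>"
def egtEmit (s : List Char) : String :=
  let i := PySem.Chars.find s ['<']
  let content := if i ≠ -1 then PySem.Chars.slice s (some (i + 1)) none else []
  String.mk ('<' :: (content ++ ['>']))

def extract_grammar_terms_alt (target : String) : List String :=
  let t1 := PySem.Str.replace target "<<" ""
  let t2 := PySem.Str.replace t1 ">>" ""
  let parts := PySem.Chars.splitOn t2.toList ['>']                       -- t.split(">")
  let terms := (PySem.List.slice parts none (some (-1))).map egtEmit    -- for s in parts[:-1]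
  PySem.List.sorted (PySem.Set.ofList terms) (fun x => x) false          -- sorted(set(terms))

-- ===== PRECONDITION & SPEC =====
def Spec_extract_grammar_terms (target : String) (out : List String) : Prop := out = extract_grammar_terms_alt target
instance (target : String) (out : List String) : Decidable (Spec_extract_grammar_terms target out) := by unfold Spec_extract_grammar_terms; infer_instance

-- ===== CLAIM (what is proved, stated in full; the proofs are below) =====
def Claim_equal_extract_grammar_terms : Prop := ∀ (target : String), Dom_extract_grammar_terms target → Spec_extract_grammar_terms target (extract_grammar_terms target)

-- ===== LEMMAS AND PROOFS =====

-- recursive single-char split on '>', with the current segment as accumulator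
def egtSplit : List Char → List Char → List (List Char)
  | pre, [] => [pre]
  | pre, x :: xs => if x = '>' then pre :: egtSplit [] xs else egtSplit (pre ++ [x]) xs

-- chars after the first '<' (all of them), [] if no '<'
def egtContent : List Char → List Char
  | [] => []
  | x :: xs => if x = '<' then xs else egtContent xs

def egtTermOf (s : List Char) : String := String.mk ('<' :: (egtContent s ++ ['>']))

-- A's loop without the terms accumulator
def egtRun : List Char → List Char → Bool → List String
  | [], _, _ => []
  | x :: xs, word, flag =>
    if x = '>' then String.mk ('<' :: (word ++ ['>'])) :: egtRun xs [] false
    else if flag then egtRun xs (word ++ [x]) flag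
    else if x = '<' then egtRun xs word true
    else egtRun xs word flag

-- what A emits from a flagged state (word, true), per split segment
def egtMapT (word : List Char) : List (List Char) → List String
  | [] => []
  | [_] => []
  | s :: rest => String.mk ('<' :: (word ++ s ++ ['>'])) :: rest.dropLast.map egtTermOf

theorem egtLoopA_enumerate (u : List Char) : ∀ (k : Int) (terms : List String) (word : List Char) (flag : Bool),
    egtLoopA (PySem.List.enumerate u k) terms word flag = terms ++ egtRun u word flag := by
  induction u with
  | nil => intro k terms word flag; simp [PySem.List.enumerate_nil, egtLoopA, egtRun]
  | cons x xs ih =>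
    intro k terms word flag
    rw [PySem.List.enumerate_cons]
    by_cases hgt : x = '>'
    · simp [egtLoopA, egtRun, hgt, ih]
    · by_cases hf : flag
      · simp [egtLoopA, egtRun, hgt, hf, ih]
      · by_cases hlt : x = '<'
        · simp [egtLoopA, egtRun, hgt, hf, hlt, ih]
        · simp [egtLoopA, egtRun, hgt, hf, hlt, ih]

theorem egtSplit_ne_nil (u : List Char) : ∀ pre, egtSplit pre u ≠ [] := by
  induction u with
  | nil => intro pre; simp [egtSplit]
  | cons x xs ih =>
    intro pre
    by_cases h : x = '>'
    · simp [egtSplit, h]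
    · simpa [egtSplit, h] using ih (pre ++ [x])

theorem egtSplit_append (u : List Char) : ∀ (pre1 pre2 s : List Char) (rest : List (List Char)),
    egtSplit pre2 u = s :: rest → egtSplit (pre1 ++ pre2) u = (pre1 ++ s) :: rest := by
  induction u with
  | nil =>
    intro pre1 pre2 s rest h
    simp only [egtSplit] at h ⊢
    obtain ⟨h1, h2⟩ := List.cons.injEq .. ▸ h
    simp_all
  | cons x xs ih =>
    intro pre1 pre2 s rest h
    by_cases hx : x = '>'
    · simp only [egtSplit, hx, if_pos] at h ⊢
      obtain ⟨h1, h2⟩ := List.cons.injEq .. ▸ h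
      simp_all
    · simp only [egtSplit, hx, ite_false] at h ⊢
      have := ih pre1 (pre2 ++ [x]) s rest h
      simp only [List.append_assoc] at this ⊢
      simp_all

theorem egtSplit_cons_head (u : List Char) (pre : List Char) (s : List Char) (rest : List (List Char))
    (h : egtSplit [] u = s :: rest) : egtSplit pre u = (pre ++ s) :: rest := by
  simpa using egtSplit_append u pre [] s rest h

-- PySem.Chars.splitOn on the one-char separator ">" is egtSplit
theorem egtSplitOn_go (fuel : Nat) : ∀ (l cur : List Char) (acc : List (List Char)), l.length ≤ fuel →
    PySem.Chars.splitOn.go ['>'] fuel l cur acc = acc.reverse ++ egtSplit cur.reverse l := by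
  induction fuel with
  | zero =>
    intro l cur acc h
    have : l = [] := List.eq_nil_of_length_eq_zero (Nat.le_zero.mp h)
    subst this
    simp [PySem.Chars.splitOn.go, egtSplit]
  | succ f ih =>
    intro l cur acc h
    cases l with
    | nil => simp [PySem.Chars.splitOn.go, egtSplit]
    | cons x xs =>
      have hlen : xs.length ≤ f := by simp [List.length_cons] at h; omega
      by_cases hx : x = '>'
      · subst hx
        have hpre : List.isPrefixOf ['>'] ('>' :: xs) = true := by simp [List.isPrefixOf]
        simp only [PySem.Chars.splitOn.go, hpre, if_true, List.length_cons, List.length_nil,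
          List.drop_succ_cons, List.drop_zero]
        rw [ih xs [] (cur.reverse :: acc) hlen]
        simp [egtSplit]
      · have hpre : List.isPrefixOf ['>'] (x :: xs) = false := by
          simp [List.isPrefixOf]
          intro hc; exact hx hc.symm
        simp only [PySem.Chars.splitOn.go, hpre, if_false, Bool.false_eq_true]
        rw [ih xs (x :: cur) acc hlen]
        simp [egtSplit, hx]

theorem egtSplitOn_eq (u : List Char) : PySem.Chars.splitOn u ['>'] = egtSplit [] u := by
  unfold PySem.Chars.splitOn
  rw [egtSplitOn_go (u.length + 1) u [] [] (Nat.le_succ _)]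
  simp

theorem egtContent_of_not_mem (s : List Char) (h : '<' ∉ s) : egtContent s = [] := by
  induction s with
  | nil => simp [egtContent]
  | cons x xs ih =>
    have hx : x ≠ '<' := fun hc => h (hc ▸ List.mem_cons_self ..)
    simp only [egtContent, if_neg hx]
    exact ih (fun hc => h (List.mem_cons_of_mem _ hc))

theorem egtContent_first (a b : List Char) (h : '<' ∉ a) : egtContent (a ++ '<' :: b) = b := by
  induction a with
  | nil => simp [egtContent]
  | cons x xs ih =>
    have hx : x ≠ '<' := fun hc => h (hc ▸ List.mem_cons_self ..)
    simp only [List.cons_append, egtContent, if_neg hx]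
    exact ih (fun hc => h (List.mem_cons_of_mem _ hc))

theorem egtFirst (s : List Char) (h : '<' ∈ s) : ∃ a b, s = a ++ '<' :: b ∧ '<' ∉ a := by
  induction s with
  | nil => simp at h
  | cons x xs ih =>
    by_cases hx : x = '<'
    · exact ⟨[], xs, by simp [hx], by simp⟩
    · obtain ⟨a, b, hs, ha⟩ := ih (by rcases List.mem_cons.mp h with h1 | h2; exact absurd h1.symm hx; exact h2)
      exact ⟨x :: a, b, by simp [hs], by simp [ha]; exact fun hc => hx hc.symm⟩

theorem egtFind_first (a b : List Char) (ha : '<' ∉ a) :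
    PySem.Chars.find (a ++ '<' :: b) ['<'] = (a.length : Int) := by
  set s := a ++ '<' :: b with hs
  have hinf : ['<'] <:+: s := (List.singleton_infix_iff _ _).mpr (by simp [hs])
  have hnn : 0 ≤ PySem.Chars.find s ['<'] := (PySem.Chars.find_nonneg_iff _ _).mpr hinf
  obtain ⟨hpre, hmin⟩ := PySem.Chars.find_spec (s := s) (sub := ['<']) hnn
  have hlt : (PySem.Chars.find s ['<']).toNat ≤ a.length := by
    by_contra hgt
    push_neg at hgt
    exact hmin a.length hgt (by simp [hs, List.cons_prefix_iff])
  have hge : a.length ≤ (PySem.Chars.find s ['<']).toNat := by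
    by_contra hgt
    push_neg at hgt
    set j := (PySem.Chars.find s ['<']).toNat with hj
    have hjlt : j < s.length := by simp [hs]; omega
    have hdrop : s.drop j = s[j]'hjlt :: s.drop (j+1) := List.drop_eq_getElem_cons hjlt
    rw [hdrop] at hpre
    have hc : s[j]'hjlt = '<' := by
      rcases hpre with ⟨t, ht⟩
      have h2 := congrArg (fun l => l.head?) ht.symm
      simp at h2
      rw [List.getElem?_eq_getElem hjlt] at h2
      exact Option.some.inj h2
    have hja : s[j]'hjlt = a[j]'hgt := List.getElem_append_left' hgt ..▸ rfl
    exact ha ((hja.symm.trans hc) ▸ List.getElem_mem hgt)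
  omega

-- B's per-segment emission is the recursive after-first-'<' scan
theorem egtEmit_eq_termOf (s : List Char) : egtEmit s = egtTermOf s := by
  by_cases hmem : '<' ∈ s
  · obtain ⟨a, b, hs, ha⟩ := egtFirst s hmem
    subst hs
    have hfind := egtFind_first a b ha
    unfold egtEmit egtTermOf
    rw [hfind, egtContent_first a b ha]
    have hne : (a.length : Int) ≠ -1 := by omega
    simp only [hne, if_pos, ne_eq, not_false_iff, if_true, PySem.Chars.slice_eq_listSlice]
    rw [PySem.List.slice_from _ (by omega)]
    congr 2
    have h1 : ((a.length : Int) + 1).toNat = a.length + 1 := by omega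
    rw [h1]
    simp
  · have hfind : PySem.Chars.find s ['<'] = -1 :=
      (PySem.Chars.find_eq_neg_one_iff _ _).mpr (fun h => hmem ((List.singleton_infix_iff _ _).mp h))
    unfold egtEmit egtTermOf
    rw [hfind, egtContent_of_not_mem s hmem]
    simp

-- joint invariant of A's loop against the split decomposition
theorem egtRun_split (u : List Char) :
    (∀ word, egtRun u word true = egtMapT word (egtSplit [] u)) ∧
      egtRun u [] false = (egtSplit [] u).dropLast.map egtTermOf := by
  induction u with
  | nil =>
    refine ⟨fun word => ?_, ?_⟩
    · simp [egtRun, egtSplit, egtMapT]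
    · simp [egtRun, egtSplit]
  | cons x xs ih =>
    obtain ⟨ih1, ih2⟩ := ih
    obtain ⟨s0, rest0, hsplit⟩ : ∃ s0 rest0, egtSplit [] xs = s0 :: rest0 := by
      cases h : egtSplit [] xs with
      | nil => exact absurd h (egtSplit_ne_nil xs [])
      | cons a l => exact ⟨a, l, rfl⟩
    refine ⟨fun word => ?_, ?_⟩
    · by_cases hgt : x = '>'
      · subst hgt
        simp only [egtRun, if_pos]
        rw [ih2, hsplit]
        simp only [egtSplit, if_pos, hsplit]
        simp [egtMapT]
      · have hx : egtSplit [] (x :: xs) = (x :: s0) :: rest0 := by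
          simp only [egtSplit, hgt, ite_false]
          simpa using egtSplit_cons_head xs [x] s0 rest0 hsplit
        simp only [egtRun, hgt, ite_false, if_pos, ite_true]
        rw [ih1 (word ++ [x]), hsplit, hx]
        cases rest0 with
        | nil => simp [egtMapT]
        | cons r rs => simp [egtMapT, List.append_assoc]
    · by_cases hgt : x = '>'
      · subst hgt
        simp only [egtRun, if_pos]
        rw [ih2, hsplit]
        simp only [egtSplit, if_pos, hsplit]
        cases rest0 with
        | nil => simp [egtTermOf, egtContent]
        | cons r rs => simp [egtTermOf, egtContent]
      · by_cases hlt : x = '<'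
        · subst hlt
          have hx : egtSplit [] ('<' :: xs) = ('<' :: s0) :: rest0 := by
            have h0 : egtSplit [] ('<' :: xs) = egtSplit ['<'] xs := by simp [egtSplit]
            rw [h0]
            simpa using egtSplit_cons_head xs ['<'] s0 rest0 hsplit
          simp only [egtRun, ite_false, if_pos, ite_true]
          rw [ih1 [], hsplit, hx]
          cases rest0 with
          | nil => simp [egtMapT]
          | cons r rs => simp [egtMapT, egtTermOf, egtContent]
        · have hx : egtSplit [] (x :: xs) = (x :: s0) :: rest0 := by
            simp only [egtSplit, hgt, ite_false]
            simpa using egtSplit_cons_head xs [x] s0 rest0 hsplit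
          simp only [egtRun, hgt, hlt, ite_false]
          rw [ih2, hsplit, hx]
          cases rest0 with
          | nil => simp
          | cons r rs => simp [egtTermOf, egtContent, hlt]

-- A's loop output equals B's parts[:-1] map, on the same preprocessed char list
theorem egt_core (u : List Char) :
    egtRun u [] false = (PySem.List.slice (PySem.Chars.splitOn u ['>']) none (some (-1))).map egtEmit := by
  rw [egtSplitOn_eq, PySem.List.slice_to_neg_one, (egtRun_split u).2]
  have h : egtEmit = egtTermOf := funext egtEmit_eq_termOf
  rw [h]

-- ===== VERDICT (by name: the statement is the Claim_ definition above) =====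
theorem extract_grammar_terms_spec : Claim_equal_extract_grammar_terms := by
  intro target _
  show extract_grammar_terms target = extract_grammar_terms_alt target
  unfold extract_grammar_terms extract_grammar_terms_alt
  simp only [egtLoopA_enumerate, egt_core, List.nil_append]
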